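-- pv_equiv track=rewrite | github.com/Naga1101/CC-Project | src/Metodo_SelecNodes.py | blocos_por_node
-- ===== SOURCE A (Python) =====
-- def blocos_por_node(fileCompl, fileIncpl, numBlocos):   # [('127.0.0.1', 0)]  [(('127.0.0.1', 0), [1, 1, 1, 0])]] 4
--     blocosIps = []
--     array_node = []
--     i = 0
--
--     while i < numBlocos:
--         for ip in fileCompl:
--             array_node.append(ip)
--
--
--         for tpl in fileIncpl:
--             if tpl[1][i] == 1:
--                 array_node.append(tpl[0])
--
--         blocosIps.append(array_node)
--         array_node = []
--         i += 1
--
--     return blocosIps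
-- ===== SOURCE B (Python) =====
-- def blocos_por_node(fileCompl, fileIncpl, numBlocos):
--     blocosIps = [list(fileCompl) for _ in range(numBlocos)]
--     for tpl in fileIncpl:
--         ip, bits = tpl
--         blocosIps = [blk + [ip] if bits[i] == 1 else blk
--                      for i, blk in enumerate(blocosIps)]
--     return blocosIps
-- ===== Notes on version B (the rewrite author's own statement) =====
-- stated objective: alternative
-- what changed: Transposed the nested loops: instead of gathering one block at a time (outer loop over block indices, inner scan of fileIncpl), B pre-builds all numBlocos blocks as copies of fileCompl and makes a single pass over fileIncpl, scattering each incomplete IP into every block whose bit is 1.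
import Mathlib
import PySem

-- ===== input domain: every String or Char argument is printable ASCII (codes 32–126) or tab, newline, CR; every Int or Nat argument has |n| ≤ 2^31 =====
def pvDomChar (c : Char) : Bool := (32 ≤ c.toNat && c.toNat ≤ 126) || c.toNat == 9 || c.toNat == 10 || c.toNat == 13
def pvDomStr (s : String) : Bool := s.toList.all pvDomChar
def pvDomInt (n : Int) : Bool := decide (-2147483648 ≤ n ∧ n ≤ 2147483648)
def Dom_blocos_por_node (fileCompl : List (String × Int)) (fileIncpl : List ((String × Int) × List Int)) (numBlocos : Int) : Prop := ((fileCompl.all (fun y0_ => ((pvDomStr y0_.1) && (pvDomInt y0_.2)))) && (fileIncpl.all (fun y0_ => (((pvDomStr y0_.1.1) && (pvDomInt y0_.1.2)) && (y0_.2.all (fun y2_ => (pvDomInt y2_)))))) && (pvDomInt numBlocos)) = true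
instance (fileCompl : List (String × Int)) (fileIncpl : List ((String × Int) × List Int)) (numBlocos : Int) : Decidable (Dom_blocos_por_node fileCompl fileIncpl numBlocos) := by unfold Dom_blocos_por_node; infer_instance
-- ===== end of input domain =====

-- B transposes A's nested loops: one pass over fileIncpl scattering each IP into the blocks, instead of gathering per block (alternative decomposition, same cost).

-- ===== PORT A =====
-- the 'while i < numBlocos' loop of A
def pvLoopA (fileCompl : List (String × Int)) (fileIncpl : List ((String × Int) × List Int)) (numBlocos : Int) (i : Int) : List (List (String × Int)) :=
  if _h : i < numBlocos then
    let arr1 := fileCompl.foldl (fun acc ip => acc ++ [ip]) []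
    let arr2 := fileIncpl.foldl (fun acc tpl => if PySem.List.pyGet? tpl.2 i == some 1 then acc ++ [tpl.1] else acc) arr1
    arr2 :: pvLoopA fileCompl fileIncpl numBlocos (i + 1)
  else []
termination_by (numBlocos - i).toNat
decreasing_by omega

def blocos_por_node (fileCompl : List (String × Int)) (fileIncpl : List ((String × Int) × List Int)) (numBlocos : Int) : List (List (String × Int)) :=
  pvLoopA fileCompl fileIncpl numBlocos 0

-- ===== PORT B =====
def blocos_por_node_alt (fileCompl : List (String × Int)) (fileIncpl : List ((String × Int) × List Int)) (numBlocos : Int) : List (List (String × Int)) :=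
  fileIncpl.foldl
    (fun blocosIps tpl =>
      (PySem.List.enumerate blocosIps).map
        (fun p => if PySem.List.pyGet? tpl.2 p.1 == some 1 then p.2 ++ [tpl.1] else p.2))
    (List.replicate numBlocos.toNat fileCompl)

-- ===== PRECONDITION & SPEC =====
-- Pre_ excludes exactly the inputs on which Python A raises IndexError: some bit list in fileIncpl shorter than numBlocos.
def Pre_blocos_por_node (fileCompl : List (String × Int)) (fileIncpl : List ((String × Int) × List Int)) (numBlocos : Int) : Prop :=
  ∀ tpl ∈ fileIncpl, numBlocos ≤ (tpl.2.length : Int)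
instance (fileCompl : List (String × Int)) (fileIncpl : List ((String × Int) × List Int)) (numBlocos : Int) : Decidable (Pre_blocos_por_node fileCompl fileIncpl numBlocos) := by unfold Pre_blocos_por_node; infer_instance

def pvWitness_blocos_por_node : (List (String × Int)) × (List ((String × Int) × List Int)) × Int :=
  ([("127.0.0.1", 0)], [(("10.0.0.2", 1), [1, 0])], 2)

def Spec_blocos_por_node (fileCompl : List (String × Int)) (fileIncpl : List ((String × Int) × List Int)) (numBlocos : Int) (out : List (List (String × Int))) : Prop := out = blocos_por_node_alt fileCompl fileIncpl numBlocos
instance (fileCompl : List (String × Int)) (fileIncpl : List ((String × Int) × List Int)) (numBlocos : Int) (out : List (List (String × Int))) : Decidable (Spec_blocos_por_node fileCompl fileIncpl numBlocos out) := by unfold Spec_blocos_por_node; infer_instance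

-- ===== CLAIM (what is proved, stated in full; the proofs are below) =====
def Claim_equal_blocos_por_node : Prop := ∀ (fileCompl : List (String × Int)) (fileIncpl : List ((String × Int) × List Int)) (numBlocos : Int), Dom_blocos_por_node fileCompl fileIncpl numBlocos → Pre_blocos_por_node fileCompl fileIncpl numBlocos → Spec_blocos_por_node fileCompl fileIncpl numBlocos (blocos_por_node fileCompl fileIncpl numBlocos)

-- ===== LEMMAS AND PROOFS =====

-- the block A builds for index k, in closed form
def pvBlockOf (fileCompl : List (String × Int)) (fileIncpl : List ((String × Int) × List Int)) (k : Int) : List (String × Int) :=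
  fileCompl ++ (fileIncpl.filter (fun tpl => PySem.List.pyGet? tpl.2 k == some 1)).map (·.1)

theorem pvLoopA_eq_map (fileCompl : List (String × Int)) (fileIncpl : List ((String × Int) × List Int)) (numBlocos : Int) (i : Int) :
    pvLoopA fileCompl fileIncpl numBlocos i
      = (PySem.List.pyRange i numBlocos 1).map (pvBlockOf fileCompl fileIncpl) := by
  rw [pvLoopA]
  split
  · rename_i h
    rw [PySem.List.pyRange_one_cons h, List.map_cons,
        pvLoopA_eq_map fileCompl fileIncpl numBlocos (i + 1)]
    simp only [PySem.List.foldl_append_singleton, List.nil_append,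
      PySem.List.foldl_append_if, pvBlockOf]
  · rename_i h
    rw [PySem.List.pyRange_one_eq_nil (by omega), List.map_nil]
termination_by (numBlocos - i).toNat
decreasing_by omega

theorem pvEnumerate_map_enumerate {α β : Type} (xs : List α) (s : Int) (g : Int × α → β) :
    PySem.List.enumerate ((PySem.List.enumerate xs s).map g) s
      = (PySem.List.enumerate xs s).map (fun p => (p.1, g p)) := by
  induction xs generalizing s with
  | nil => simp [PySem.List.enumerate_nil]
  | cons x xs ih => simp [PySem.List.enumerate_cons, ih]

theorem pvFoldB_eq (fileIncpl : List ((String × Int) × List Int)) (init : List (List (String × Int))) :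
    fileIncpl.foldl
      (fun blocosIps tpl =>
        (PySem.List.enumerate blocosIps).map
          (fun p => if PySem.List.pyGet? tpl.2 p.1 == some 1 then p.2 ++ [tpl.1] else p.2))
      init
    = (PySem.List.enumerate init).map
        (fun p => p.2 ++ ((fileIncpl.filter (fun tpl => PySem.List.pyGet? tpl.2 p.1 == some 1)).map (·.1))) := by
  induction fileIncpl generalizing init with
  | nil =>
    simpa [List.map_id_fun'] using
      (PySem.List.map_snd_enumerate (xs := init) (s := 0)).symm
  | cons tpl rest ih =>
    rw [List.foldl_cons, ih, pvEnumerate_map_enumerate, List.map_map]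
    refine List.map_congr_left ?_
    intro p _
    by_cases h : PySem.List.pyGet? tpl.2 p.1 = some 1 <;>
      simp [h, List.append_assoc]

theorem pvEnumerate_replicate {α : Type} (m : Nat) (x : α) (s : Int) :
    PySem.List.enumerate (List.replicate m x) s
      = (PySem.List.pyRange s (s + (m : Int)) 1).map (fun j => (j, x)) := by
  induction m generalizing s with
  | zero => simp [PySem.List.enumerate_nil, PySem.List.pyRange_one_eq_nil]
  | succ m ih =>
    have hb : s + ((m + 1 : Nat) : Int) = (s + 1) + (m : Nat) := by push_cast; ring
    rw [List.replicate_succ, PySem.List.enumerate_cons, hb,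
        PySem.List.pyRange_one_cons (a := s) (b := (s + 1) + (m : Nat)) (by omega),
        List.map_cons, ih]

theorem pvRange_toNat (n : Int) :
    PySem.List.pyRange 0 (n.toNat : Int) 1 = PySem.List.pyRange 0 n 1 := by
  by_cases h : 0 ≤ n
  · rw [Int.toNat_of_nonneg h]
  · rw [PySem.List.pyRange_one_eq_nil (by omega), PySem.List.pyRange_one_eq_nil (by omega)]

-- ===== VERDICT (by name: the statement is the Claim_ definition above) =====
theorem blocos_por_node_spec : Claim_equal_blocos_por_node := by
  intro fileCompl fileIncpl numBlocos _dom _pre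
  show blocos_por_node fileCompl fileIncpl numBlocos = blocos_por_node_alt fileCompl fileIncpl numBlocos
  rw [blocos_por_node, blocos_por_node_alt, pvLoopA_eq_map, pvFoldB_eq,
      pvEnumerate_replicate, List.map_map]
  simp only [Int.zero_add, pvRange_toNat]
  rfl
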